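-- pv_equiv track=rewrite | github.com/oernster/trainer | src/core/services/route_service_refactored.py | _get_best_london_terminus_for_route
-- ===== SOURCE A (Python) =====
-- from typing import List, Optional, Dict, Any, Tuple
--
-- def _get_best_london_terminus_for_route(from_station: str, to_station: str) -> Optional[str]:
--     """
--     Get the best London terminus for a route based on the origin station.
--
--     Args:
--         from_station: Starting station
--         to_station: Destination station
--
--     Returns:
--         Best London terminus name or None
--     """
--     # Define terminus preferences based on regions
--     southwest_stations = ["Farnborough", "Basingstoke", "Southampton", "Woking", "Guildford", "Winchester"]
--     western_stations = ["Reading", "Swindon", "Bristol", "Oxford", "Bath"]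
--     eastern_stations = ["Colchester", "Chelmsford", "Ipswich", "Norwich", "Cambridge"]
--     northern_stations = ["Birmingham", "Manchester", "Leeds", "York", "Newcastle"]
--
--     # Check regional preferences
--     from_lower = from_station.lower()
--
--     if any(station.lower() in from_lower for station in southwest_stations):
--         return "London Waterloo"
--     elif any(station.lower() in from_lower for station in western_stations):
--         return "London Paddington"
--     elif any(station.lower() in from_lower for station in eastern_stations):
--         return "London Liverpool Street"
--     elif any(station.lower() in from_lower for station in northern_stations):
--         return "London Euston"
--
--     # Default to Waterloo for unknown origins
--     return "London Waterloo"
-- ===== SOURCE B (Python) =====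
-- def _get_best_london_terminus_for_route(from_station: str, to_station: str):
--     """Flat ranked-keyword table: one pass computing the minimum region rank
--     among matching keywords, then index into a terminus table (rank 4 = default)."""
--     terminus_by_rank = ["London Waterloo", "London Paddington",
--                         "London Liverpool Street", "London Euston",
--                         "London Waterloo"]
--     keywords = [
--         ("farnborough", 0), ("basingstoke", 0), ("southampton", 0),
--         ("woking", 0), ("guildford", 0), ("winchester", 0),
--         ("reading", 1), ("swindon", 1), ("bristol", 1), ("oxford", 1), ("bath", 1),
--         ("colchester", 2), ("chelmsford", 2), ("ipswich", 2),
--         ("norwich", 2), ("cambridge", 2),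
--         ("birmingham", 3), ("manchester", 3), ("leeds", 3),
--         ("york", 3), ("newcastle", 3),
--     ]
--     from_lower = from_station.lower()
--     best = 4
--     for kw, rank in keywords:
--         if rank < best and kw in from_lower:
--             best = rank
--     return terminus_by_rank[best]
-- ===== Notes on version B (the rewrite author's own statement) =====
-- stated objective: alternative
-- what changed: Replaces the four staged if/elif any()-per-region branches with a single pass over a flat ranked-keyword list that computes the minimum matching region rank into an accumulator, then indexes a terminus table (with rank 4 as the Waterloo default).
import Mathlib
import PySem

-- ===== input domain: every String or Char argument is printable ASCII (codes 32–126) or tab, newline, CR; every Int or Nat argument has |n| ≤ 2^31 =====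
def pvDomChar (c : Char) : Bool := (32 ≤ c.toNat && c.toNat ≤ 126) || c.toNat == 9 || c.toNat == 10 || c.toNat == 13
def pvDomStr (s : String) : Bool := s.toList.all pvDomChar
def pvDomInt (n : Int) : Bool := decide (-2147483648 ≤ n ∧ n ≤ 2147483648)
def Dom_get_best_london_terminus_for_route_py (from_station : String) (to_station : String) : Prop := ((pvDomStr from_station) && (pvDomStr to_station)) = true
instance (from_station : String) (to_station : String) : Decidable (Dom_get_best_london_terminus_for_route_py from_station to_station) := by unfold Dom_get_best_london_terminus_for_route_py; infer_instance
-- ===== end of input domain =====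

-- B replaces the staged if/elif any()-per-region branches with one pass over a flat
-- ranked-keyword list computing the minimum matching region rank, then a table index (alternative; same cost).

-- ===== PORT A =====
def get_best_london_terminus_for_route_py (from_station : String) (to_station : String) : Option String :=
  let southwest_stations := ["Farnborough", "Basingstoke", "Southampton", "Woking", "Guildford", "Winchester"]
  let western_stations := ["Reading", "Swindon", "Bristol", "Oxford", "Bath"]
  let eastern_stations := ["Colchester", "Chelmsford", "Ipswich", "Norwich", "Cambridge"]
  let northern_stations := ["Birmingham", "Manchester", "Leeds", "York", "Newcastle"]
  let from_lower := PySem.Str.lower from_station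
  if southwest_stations.any (fun st => PySem.Str.isIn (PySem.Str.lower st) from_lower) then
    some "London Waterloo"
  else if western_stations.any (fun st => PySem.Str.isIn (PySem.Str.lower st) from_lower) then
    some "London Paddington"
  else if eastern_stations.any (fun st => PySem.Str.isIn (PySem.Str.lower st) from_lower) then
    some "London Liverpool Street"
  else if northern_stations.any (fun st => PySem.Str.isIn (PySem.Str.lower st) from_lower) then
    some "London Euston"
  else
    some "London Waterloo"

-- ===== PORT B =====
-- loop body of B's single pass: keep the smaller region rank when the keyword matches
def pvStep (from_lower : String) (best : Nat) (p : String × Nat) : Nat :=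
  if p.2 < best ∧ PySem.Str.isIn p.1 from_lower = true then p.2 else best

def get_best_london_terminus_for_route_py_alt (from_station : String) (to_station : String) : Option String :=
  let terminus_by_rank := ["London Waterloo", "London Paddington", "London Liverpool Street", "London Euston", "London Waterloo"]
  let keywords : List (String × Nat) :=
    [("farnborough", 0), ("basingstoke", 0), ("southampton", 0), ("woking", 0), ("guildford", 0), ("winchester", 0),
     ("reading", 1), ("swindon", 1), ("bristol", 1), ("oxford", 1), ("bath", 1),
     ("colchester", 2), ("chelmsford", 2), ("ipswich", 2), ("norwich", 2), ("cambridge", 2),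
     ("birmingham", 3), ("manchester", 3), ("leeds", 3), ("york", 3), ("newcastle", 3)]
  let from_lower := PySem.Str.lower from_station
  let best := keywords.foldl (pvStep from_lower) 4
  PySem.List.pyGet? terminus_by_rank (best : Int)

-- ===== PRECONDITION & SPEC =====
def Spec_get_best_london_terminus_for_route_py (from_station : String) (to_station : String) (out : Option String) : Prop := out = get_best_london_terminus_for_route_py_alt from_station to_station
instance (from_station : String) (to_station : String) (out : Option String) : Decidable (Spec_get_best_london_terminus_for_route_py from_station to_station out) := by unfold Spec_get_best_london_terminus_for_route_py; infer_instance

-- ===== CLAIM =====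
def Claim_equal_get_best_london_terminus_for_route_py : Prop := ∀ (from_station : String) (to_station : String), Dom_get_best_london_terminus_for_route_py from_station to_station → Spec_get_best_london_terminus_for_route_py from_station to_station (get_best_london_terminus_for_route_py from_station to_station)

-- ===== LEMMAS AND PROOFS =====
-- folding one region's keywords (all of rank r): result is r iff r improves on b and some keyword matches
theorem pv_fold_group (s : String) (r : Nat) (kws : List String) (b : Nat) :
    (kws.map (fun kw => (kw, r))).foldl (pvStep s) b =
      if r < b ∧ kws.any (fun kw => PySem.Str.isIn kw s) = true then r else b := by
  induction kws generalizing b with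
  | nil => simp
  | cons k ks ih =>
    simp only [List.map_cons, List.foldl_cons, List.any_cons]
    rw [ih]
    by_cases hk : PySem.Chars.isIn k.toList s.toList = true <;>
      by_cases hks : ∃ x ∈ ks, PySem.Chars.isIn x.toList s.toList = true <;>
        by_cases hr : r < b <;>
          simp [pvStep, hk, hks, hr, lt_self_iff_false]

-- ===== VERDICT =====
set_option maxHeartbeats 2000000 in
theorem get_best_london_terminus_for_route_py_spec : Claim_equal_get_best_london_terminus_for_route_py := by
  intro from_station to_station _
  unfold Spec_get_best_london_terminus_for_route_py get_best_london_terminus_for_route_py get_best_london_terminus_for_route_py_alt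
  have hsplit : ([("farnborough", 0), ("basingstoke", 0), ("southampton", 0), ("woking", 0), ("guildford", 0), ("winchester", 0),
     ("reading", 1), ("swindon", 1), ("bristol", 1), ("oxford", 1), ("bath", 1),
     ("colchester", 2), ("chelmsford", 2), ("ipswich", 2), ("norwich", 2), ("cambridge", 2),
     ("birmingham", 3), ("manchester", 3), ("leeds", 3), ("york", 3), ("newcastle", 3)] : List (String × Nat)) =
      (["farnborough", "basingstoke", "southampton", "woking", "guildford", "winchester"].map (fun kw => (kw, 0)))
      ++ (["reading", "swindon", "bristol", "oxford", "bath"].map (fun kw => (kw, 1)))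
      ++ (["colchester", "chelmsford", "ipswich", "norwich", "cambridge"].map (fun kw => (kw, 2)))
      ++ (["birmingham", "manchester", "leeds", "york", "newcastle"].map (fun kw => (kw, 3))) := rfl
  rw [hsplit]
  simp only [List.foldl_append, pv_fold_group]
  have l0 : PySem.Str.lower "Farnborough" = "farnborough" := by decide
  have l1 : PySem.Str.lower "Basingstoke" = "basingstoke" := by decide
  have l2 : PySem.Str.lower "Southampton" = "southampton" := by decide
  have l3 : PySem.Str.lower "Woking" = "woking" := by decide
  have l4 : PySem.Str.lower "Guildford" = "guildford" := by decide
  have l5 : PySem.Str.lower "Winchester" = "winchester" := by decide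
  have l6 : PySem.Str.lower "Reading" = "reading" := by decide
  have l7 : PySem.Str.lower "Swindon" = "swindon" := by decide
  have l8 : PySem.Str.lower "Bristol" = "bristol" := by decide
  have l9 : PySem.Str.lower "Oxford" = "oxford" := by decide
  have l10 : PySem.Str.lower "Bath" = "bath" := by decide
  have l11 : PySem.Str.lower "Colchester" = "colchester" := by decide
  have l12 : PySem.Str.lower "Chelmsford" = "chelmsford" := by decide
  have l13 : PySem.Str.lower "Ipswich" = "ipswich" := by decide
  have l14 : PySem.Str.lower "Norwich" = "norwich" := by decide
  have l15 : PySem.Str.lower "Cambridge" = "cambridge" := by decide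
  have l16 : PySem.Str.lower "Birmingham" = "birmingham" := by decide
  have l17 : PySem.Str.lower "Manchester" = "manchester" := by decide
  have l18 : PySem.Str.lower "Leeds" = "leeds" := by decide
  have l19 : PySem.Str.lower "York" = "york" := by decide
  have l20 : PySem.Str.lower "Newcastle" = "newcastle" := by decide
  simp only [List.any_cons, List.any_nil, Bool.or_false, l0, l1, l2, l3, l4, l5, l6, l7, l8, l9, l10, l11, l12, l13, l14, l15, l16, l17, l18, l19, l20]
  set fl := PySem.Str.lower from_station
  by_cases c0 : ((PySem.Str.isIn "farnborough" fl || (PySem.Str.isIn "basingstoke" fl || (PySem.Str.isIn "southampton" fl || (PySem.Str.isIn "woking" fl || (PySem.Str.isIn "guildford" fl || PySem.Str.isIn "winchester" fl)))))) = true <;>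
    by_cases c1 : ((PySem.Str.isIn "reading" fl || (PySem.Str.isIn "swindon" fl || (PySem.Str.isIn "bristol" fl || (PySem.Str.isIn "oxford" fl || PySem.Str.isIn "bath" fl))))) = true <;>
    by_cases c2 : ((PySem.Str.isIn "colchester" fl || (PySem.Str.isIn "chelmsford" fl || (PySem.Str.isIn "ipswich" fl || (PySem.Str.isIn "norwich" fl || PySem.Str.isIn "cambridge" fl))))) = true <;>
    by_cases c3 : ((PySem.Str.isIn "birmingham" fl || (PySem.Str.isIn "manchester" fl || (PySem.Str.isIn "leeds" fl || (PySem.Str.isIn "york" fl || PySem.Str.isIn "newcastle" fl))))) = true <;>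
    simp only [c0, c1, c2, c3] <;> decide
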